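-- pv_equiv track=rewrite | github.com/syna222/MA_thesis_bundestagsprotokolle | 02)_set_tags.py | own_replace
-- ===== SOURCE A (Python) =====
-- def own_replace(text):
--     i = 0
--     bool = "False"
--     for t in text:
--         if t == "(" or t == "[":
--             bool = "True"
--             break
--         i += 1
--     if bool == "True":
--         newly = text[:i] + "\\" + text[i:]
--     else:
--         newly = text
--     return newly
-- ===== SOURCE B (Python) =====
-- def own_replace(text):
--     positions = [p for p in (text.find('('), text.find('[')) if p != -1]
--     if not positions:
--         return text
--     i = min(positions)
--     return text[:i] + "\\" + text[i:]
-- ===== Notes on version B (the rewrite author's own statement) =====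
-- stated objective: simpler
-- what changed: Replaces the manual index-counting loop with string-flag break by two str.find calls whose non-negative results are combined with min to get the insertion index.
import Mathlib
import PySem

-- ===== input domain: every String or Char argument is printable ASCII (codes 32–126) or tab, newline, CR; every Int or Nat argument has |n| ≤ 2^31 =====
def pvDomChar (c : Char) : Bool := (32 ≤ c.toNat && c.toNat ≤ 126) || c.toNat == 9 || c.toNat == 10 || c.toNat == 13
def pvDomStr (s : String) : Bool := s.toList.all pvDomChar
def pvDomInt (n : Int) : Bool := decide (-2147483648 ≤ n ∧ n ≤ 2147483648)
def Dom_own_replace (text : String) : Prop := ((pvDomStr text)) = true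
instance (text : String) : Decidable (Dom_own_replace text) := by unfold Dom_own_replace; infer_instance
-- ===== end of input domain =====

-- B computes the insertion index by two str.find scans combined with min instead of A's manual counting loop with a string flag; objective: simpler.

-- ===== PORT A =====
-- the for-loop with counter i, flag and break; returns (i, found)
def ownLoopA : List Char → Nat → Nat × Bool
  | [], i => (i, false)
  | t :: rest, i => if t == '(' || t == '[' then (i, true) else ownLoopA rest (i + 1)

def own_replace (text : String) : String :=
  let r := ownLoopA text.toList 0
  if r.2 then
    -- text[:i] + "\\" + text[i:]; string concatenation done on the char list (exact)
    String.ofList (PySem.Chars.slice text.toList none (some (r.1 : Int)) ++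
      '\\' :: PySem.Chars.slice text.toList (some (r.1 : Int)) none)
  else text

-- ===== PORT B =====
def own_replace_alt (text : String) : String :=
  let positions := ([PySem.Chars.find text.toList ['('],
                     PySem.Chars.find text.toList ['[']]).filter (· ≠ -1)
  match PySem.List.min? positions id with
  | none => text
  | some i =>
      String.ofList (PySem.Chars.slice text.toList none (some i) ++
        '\\' :: PySem.Chars.slice text.toList (some i) none)

-- ===== PRECONDITION & SPEC =====
def Spec_own_replace (text : String) (out : String) : Prop := out = own_replace_alt text
instance (text : String) (out : String) : Decidable (Spec_own_replace text out) := by unfold Spec_own_replace; infer_instance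

-- ===== CLAIM (what is proved, stated in full; the proofs are below) =====
def Claim_equal_own_replace : Prop := ∀ (text : String), Dom_own_replace text → Spec_own_replace text (own_replace text)

-- ===== LEMMAS AND PROOFS =====
lemma go_lb (sub : List Char) (hsub : sub.isEmpty = false) :
    ∀ (cs : List Char) (k : Nat),
      PySem.Chars.find.go sub cs k = -1 ∨ (k : Int) ≤ PySem.Chars.find.go sub cs k := by
  intro cs
  induction cs with
  | nil => intro k; left; simp [PySem.Chars.find.go, hsub]
  | cons c t ih =>
      intro k
      rw [PySem.Chars.find.go]
      split_ifs with h
      · right; exact le_refl _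
      · rcases ih (k + 1) with h1 | h1
        · left; exact h1
        · right; refine le_trans ?_ h1; push_cast; omega

lemma min_first (k : Nat) (g : Int) (hg : g = -1 ∨ (k : Int) + 1 ≤ g) :
    PySem.List.min? (([(k : Int), g]).filter (· ≠ -1)) id = some (k : Int) := by
  have hk : ((k : Int)) ≠ -1 := by omega
  rcases hg with hg | hg
  · simp [PySem.List.min?, List.filter, hk, hg]
  · have hne : g ≠ -1 := by omega
    simp [PySem.List.min?, List.filter, hk, hne]
    omega

lemma min_second (k : Nat) (g : Int) (hg : g = -1 ∨ (k : Int) + 1 ≤ g) :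
    PySem.List.min? (([g, (k : Int)]).filter (· ≠ -1)) id = some (k : Int) := by
  have hk : ((k : Int)) ≠ -1 := by omega
  rcases hg with hg | hg
  · simp [PySem.List.min?, List.filter, hk, hg]
  · have hne : g ≠ -1 := by omega
    simp [PySem.List.min?, List.filter, hk, hne]
    omega

lemma loop_min (cs : List Char) (k : Nat) :
    PySem.List.min? (([PySem.Chars.find.go ['('] cs k,
        PySem.Chars.find.go ['['] cs k]).filter (· ≠ -1)) id
      = (if (ownLoopA cs k).2 then some ((ownLoopA cs k).1 : Int) else none) := by
  induction cs generalizing k with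
  | nil => simp [PySem.Chars.find.go, ownLoopA, PySem.List.min?]
  | cons c t ih =>
      rw [PySem.Chars.find.go, PySem.Chars.find.go]
      by_cases hp : c = '('
      · subst hp
        have h1 : (['('].isPrefixOf ('(' :: t)) = true := by simp [List.isPrefixOf]
        have h2 : (['['].isPrefixOf ('(' :: t)) = false := by simp [List.isPrefixOf]
        have h3 : ownLoopA ('(' :: t) k = (k, true) := by simp [ownLoopA]
        rw [h1, h2, h3]
        simp only [if_true, if_false, Bool.false_eq_true]
        refine min_first k _ ?_
        rcases go_lb ['['] (by decide) t (k + 1) with h | h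
        · exact Or.inl h
        · right; push_cast at h; omega
      · by_cases hbk : c = '['
        · subst hbk
          have h1 : (['('].isPrefixOf ('[' :: t)) = false := by simp [List.isPrefixOf]
          have h2 : (['['].isPrefixOf ('[' :: t)) = true := by simp [List.isPrefixOf]
          have h3 : ownLoopA ('[' :: t) k = (k, true) := by simp [ownLoopA]
          rw [h1, h2, h3]
          simp only [if_true, if_false, Bool.false_eq_true]
          refine min_second k _ ?_
          rcases go_lb ['('] (by decide) t (k + 1) with h | h
          · exact Or.inl h
          · right; push_cast at h; omega
        · have h1 : (['('].isPrefixOf (c :: t)) = false := by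
            simp [List.isPrefixOf]; exact fun h => hp h.symm
          have h2 : (['['].isPrefixOf (c :: t)) = false := by
            simp [List.isPrefixOf]; exact fun h => hbk h.symm
          have h3 : (ownLoopA (c :: t) k) = ownLoopA t (k + 1) := by
            simp [ownLoopA, hp, hbk]
          rw [h1, h2, h3]
          simp only [if_false, Bool.false_eq_true]
          exact ih (k + 1)

-- ===== VERDICT (by name: the statement is the Claim_ definition above) =====
theorem own_replace_spec : Claim_equal_own_replace := by
  intro text _
  unfold Spec_own_replace own_replace own_replace_alt PySem.Chars.find
  have h := loop_min text.toList 0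
  cases hf : (ownLoopA text.toList 0).2
  · simp only [hf, Bool.false_eq_true, if_false] at h ⊢
    rw [h]
  · simp only [hf, if_true] at h ⊢
    rw [h]
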